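-- pv_equiv track=rewrite | github.com/sohamsshah/AlgorithmsONLY | String/missing_characters_in_a_panagram.py | missingPanagram
-- ===== SOURCE A (Python) =====
-- def missingPanagram(s):
--     ideal_panagram = 'abcdefghijklmnopqrstuvwxyz'
--     ideal_panagram = list(ideal_panagram)
--     ans = ""
--     s = s.lower()
--     for i in range(len(s)):
--         if s[i] >= 'a' and s[i] <= 'z':
--             ideal_panagram[ord(s[i]) - ord('a')] = '#'
--     for i in ideal_panagram:
--         if i != '#':
--             ans+=i
--     return ans
-- ===== SOURCE B (Python) =====
-- def missingPanagram(s):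
--     present = set(s.lower())
--     return ''.join(sorted(set('abcdefghijklmnopqrstuvwxyz') - present))
-- ===== Notes on version B (the rewrite author's own statement) =====
-- stated objective: idiomatic
-- what changed: Replaces the 26-slot mark array written by an index loop plus a sentinel scan with a single set difference (alphabet minus set(s.lower())) followed by a sort; the set operations run in C, so B is also measurably faster by a constant factor.
import Mathlib
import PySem

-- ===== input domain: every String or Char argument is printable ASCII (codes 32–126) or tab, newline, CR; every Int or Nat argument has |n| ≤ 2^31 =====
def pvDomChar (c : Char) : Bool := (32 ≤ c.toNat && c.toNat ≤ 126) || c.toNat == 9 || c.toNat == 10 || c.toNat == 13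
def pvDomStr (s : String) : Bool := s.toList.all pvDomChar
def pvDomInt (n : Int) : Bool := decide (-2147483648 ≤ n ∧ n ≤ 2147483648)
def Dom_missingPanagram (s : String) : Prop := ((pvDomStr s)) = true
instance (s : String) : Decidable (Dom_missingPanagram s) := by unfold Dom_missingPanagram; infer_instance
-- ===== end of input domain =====

-- B replaces A's 26-slot mark array and sentinel scan by a set difference (alphabet minus set(s.lower())) plus a sort: same result, idiomatic shape.


-- ===== PORT A =====
def missingPanagram (s : String) : String :=
  let idealPanagram := "abcdefghijklmnopqrstuvwxyz".toList
  let t := (PySem.Str.lower s).toList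
  let marked := (PySem.List.pyRange 0 (PySem.List.len t)).foldl
    (fun arr i =>
      let c := PySem.List.pyGetD t i ' '   -- i ∈ range(len t), so exact for Python t[i]
      if 'a' ≤ c ∧ c ≤ 'z' then arr.set (c.toNat - 97) '#' else arr) idealPanagram
  -- ord(s[i]) - ord('a'): the guard gives 97 ≤ c.toNat, so Nat subtraction is exact; 'ans += i' builds the string as its char list
  String.ofList (marked.foldl (fun ans c => if c ≠ '#' then ans ++ [c] else ans) [])

-- ===== PORT B =====
def missingPanagram_alt (s : String) : String :=
  let present : PySem.Set Char := PySem.Set.ofList (PySem.Str.lower s).toList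
  let missing := PySem.List.sorted
    (PySem.Set.diff (PySem.Set.ofList "abcdefghijklmnopqrstuvwxyz".toList) present) (fun c => c)
  String.ofList missing

-- ===== PRECONDITION & SPEC =====
def Spec_missingPanagram (s : String) (out : String) : Prop := out = missingPanagram_alt s
instance (s : String) (out : String) : Decidable (Spec_missingPanagram s out) := by unfold Spec_missingPanagram; infer_instance

-- ===== CLAIM =====
def Claim_equal_missingPanagram : Prop := ∀ (s : String), Dom_missingPanagram s → Spec_missingPanagram s (missingPanagram s)

-- ===== LEMMAS AND PROOFS =====
def pvAlpha : List Char := "abcdefghijklmnopqrstuvwxyz".toList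

set_option maxRecDepth 10000 in
lemma pvAlpha_letters_bool : pvAlpha.all (fun a => decide ('a' ≤ a ∧ a ≤ 'z')) = true := by decide

lemma pvAlpha_letters : ∀ a ∈ pvAlpha, 'a' ≤ a ∧ a ≤ 'z' := by
  have h := pvAlpha_letters_bool
  rw [List.all_eq_true] at h
  intro a ha
  simpa using h a ha

set_option maxRecDepth 10000 in
lemma pvAlpha_getElem_toNat : ∀ (i : Nat) (h : i < pvAlpha.length), (pvAlpha[i]'h).toNat = 97 + i := by decide

lemma pv_set_map (f : Char → Char) (c : Char) (h : 'a' ≤ c ∧ c ≤ 'z') :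
    (pvAlpha.map f).set (c.toNat - 97) '#' = pvAlpha.map (fun a => if a = c then '#' else f a) := by
  have h1 : 97 ≤ c.toNat := Fin.mk_le_mk.mp h.1
  have h2 : c.toNat ≤ 122 := Fin.mk_le_mk.mp h.2
  apply List.ext_getElem
  · simp
  · intro i hi hj
    simp only [List.length_set, List.length_map] at hi
    rw [List.getElem_set, List.getElem_map, List.getElem_map]
    have hA : (pvAlpha[i]'(by simpa using hi)).toNat = 97 + i := pvAlpha_getElem_toNat i (by simpa using hi)
    by_cases he : pvAlpha[i]'(by simpa using hi) = c
    · have : c.toNat - 97 = i := by rw [← he, hA]; omega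
      simp [this, he]
    · have : ¬ (c.toNat - 97 = i) := by
        intro hcon
        apply he
        apply Char.ext; apply UInt32.toNat_inj.mp
        show (pvAlpha[i]'_).toNat = c.toNat
        rw [hA]; omega
      simp [this, he]

lemma pv_mark_eq (t : List Char) (f : Char → Char) :
    t.foldl (fun arr c => if 'a' ≤ c ∧ c ≤ 'z' then arr.set (c.toNat - 97) '#' else arr) (pvAlpha.map f)
      = pvAlpha.map (fun a => if a ∈ t then '#' else f a) := by
  induction t generalizing f with
  | nil => simp
  | cons c t ih =>
    simp only [List.foldl_cons]
    by_cases h : 'a' ≤ c ∧ c ≤ 'z'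
    · rw [if_pos h, pv_set_map f c h, ih]
      apply List.map_congr_left
      intro a _
      by_cases hm : a = c <;> by_cases ht : a ∈ t <;> simp [hm, ht]
    · rw [if_neg h, ih]
      apply List.map_congr_left
      intro a ha
      have hl := pvAlpha_letters a ha
      have hne : a ≠ c := by rintro rfl; exact h hl
      simp [hne]

lemma pv_filter_eq (t : List Char) :
    ((pvAlpha.map (fun a => if a ∈ t then '#' else a)).filter (fun c => decide (c ≠ '#')))
      = pvAlpha.filter (fun a => decide (a ∉ t)) := by
  rw [List.filter_map]
  rw [List.filter_congr (q := fun a => decide (a ∉ t)) ?_]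
  · apply List.map_congr_left ?_ |>.trans (List.map_id _)
    intro a ha
    have : a ∉ t := by simpa using (List.of_mem_filter ha)
    simp [this]
  · intro a ha
    have hl := pvAlpha_letters a ha
    by_cases ht : a ∈ t
    · simp [ht]
    · have : a ≠ '#' := by rintro rfl; revert hl; decide
      simp [ht, this]

set_option maxRecDepth 10000 in
lemma pv_alpha_pairwise : List.Pairwise (fun a b : Char => a < b) pvAlpha := by decide

-- ===== VERDICT =====
set_option maxRecDepth 10000 in
set_option maxHeartbeats 1000000 in
theorem missingPanagram_spec : Claim_equal_missingPanagram := by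
  intro s _
  show missingPanagram s = missingPanagram_alt s
  unfold missingPanagram missingPanagram_alt
  simp only []
  set t := (PySem.Str.lower s).toList with ht
  congr 1
  rw [PySem.List.foldl_pyRange_pyGetD t ' ' (fun arr c => if 'a' ≤ c ∧ c ≤ 'z' then arr.set (c.toNat - 97) '#' else arr) "abcdefghijklmnopqrstuvwxyz".toList (le_refl 0)]
  simp only [Int.toNat_zero, List.drop_zero]
  have hmap : "abcdefghijklmnopqrstuvwxyz".toList = pvAlpha.map id := by simp [pvAlpha]
  rw [hmap, pv_mark_eq t id]
  rw [PySem.List.foldl_append_ite_eq_filter (fun c => c ≠ '#')]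
  simp only [List.nil_append]
  have hid : (fun a => if a ∈ t then '#' else id a) = (fun a => if a ∈ t then '#' else a) := rfl
  rw [hid, pv_filter_eq t]
  -- B side
  rw [List.map_id]
  have hof : PySem.Set.ofList pvAlpha = pvAlpha := by decide
  rw [hof]
  have hdiff : PySem.Set.diff pvAlpha (PySem.Set.ofList t) = pvAlpha.filter (fun a => decide (a ∉ t)) := by
    unfold PySem.Set.diff
    apply List.filter_congr
    intro a _
    simp [PySem.Set.mem_ofList]
  rw [hdiff]
  symm
  apply PySem.List.sorted_eq_of_perm_of_pairwise_lt
  · exact List.Perm.refl _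
  · exact List.Pairwise.filter _ pv_alpha_pairwise
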